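-- pv_equiv track=rewrite | github.com/jefrya123/Controlled-Scan | scanner.py | classify_url
-- ===== SOURCE A (Python) =====
-- def classify_url(value: str) -> str:
--     """
--     Smart URL classification that distinguishes US vs foreign domains.
--
--     Args:
--         value: URL value to classify
--
--     Returns:
--         "controlled" for US, "non-controlled" for foreign
--     """
--     clean_value = value.strip().lower()
--
--     # Skip if it's just a domain from an email (common false positive)
--     if '@' in clean_value:
--         return "skip"  # Skip partial email matches
--
--     # US government and education domains
--     us_domains = {
--         '.gov', '.mil', '.edu', '.us', '.org', '.net'
--     }
--
--     # Foreign country domains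
--     foreign_domains = {
--         '.cn', '.ru', '.de', '.fr', '.br', '.uk', '.es', '.it', '.jp', '.kr',
--         '.in', '.au', '.ca', '.mx', '.ar', '.cl', '.pe', '.co', '.ve', '.ec',
--         '.bo', '.py', '.uy', '.gy', '.sr', '.gf', '.fk', '.gs', '.io', '.sh',
--         '.ac', '.tc', '.vg', '.ai', '.ag', '.bb', '.gd', '.lc', '.vc', '.dm',
--         '.kn', '.tt', '.jm', '.ht', '.do', '.pr', '.cu', '.bs', '.bz', '.gt',
--         '.sv', '.hn', '.ni', '.cr', '.pa', '.aw', '.cw', '.bq', '.sx', '.bl',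
--         '.mf', '.gp', '.mq', '.yt', '.re', '.sc', '.mu', '.km', '.mg', '.zw',
--         '.na', '.bw', '.ls', '.sz', '.za', '.mz', '.zm', '.mw', '.tz', '.ke',
--         '.ug', '.rw', '.bi', '.dj', '.so', '.et', '.er', '.sd', '.ss', '.cf',
--         '.cg', '.cd', '.ga', '.gq', '.cm', '.st', '.ao', '.gw', '.gn', '.sl',
--         '.lr', '.ci', '.bf', '.ml', '.ne', '.td', '.mr', '.sn', '.gm', '.gn',
--         '.gw', '.cv', '.ma', '.dz', '.tn', '.ly', '.eg', '.sd', '.ss', '.et',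
--         '.dj', '.so', '.ke', '.tz', '.ug', '.rw', '.bi', '.mw', '.zm', '.zw',
--         '.na', '.bw', '.ls', '.sz', '.za', '.mz', '.mg', '.km', '.mu', '.sc',
--         '.re', '.yt', '.mq', '.gp', '.bl', '.mf', '.sx', '.bq', '.cw', '.aw',
--         '.pa', '.cr', '.ni', '.hn', '.sv', '.gt', '.bz', '.bs', '.cu', '.pr',
--         '.do', '.ht', '.jm', '.tt', '.kn', '.dm', '.vc', '.lc', '.gd', '.bb',
--         '.ag', '.ai', '.vg', '.tc', '.ac', '.sh', '.io', '.gs', '.fk', '.gf',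
--         '.sr', '.gy', '.uy', '.py', '.bo', '.ec', '.ve', '.co', '.pe', '.cl',
--         '.ar', '.mx', '.ca', '.au', '.in', '.kr', '.jp', '.it', '.es', '.uk',
--         '.br', '.fr', '.de', '.ru', '.cn'
--     }
--
--     # Check for US domains
--     for us_domain in us_domains:
--         if clean_value.endswith(us_domain):
--             return "controlled"
--
--     # Check for foreign domains
--     for foreign_domain in foreign_domains:
--         if clean_value.endswith(foreign_domain):
--             return "non-controlled"
--
--     # Handle .com domains (could be US or foreign)
--     if clean_value.endswith('.com'):
--         # Common US company domains
--         us_companies = {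
--             'gmail.com', 'yahoo.com', 'hotmail.com', 'outlook.com', 'aol.com',
--             'apple.com', 'microsoft.com', 'google.com', 'amazon.com', 'facebook.com',
--             'twitter.com', 'linkedin.com', 'netflix.com', 'spotify.com', 'uber.com',
--             'lyft.com', 'airbnb.com', 'salesforce.com', 'oracle.com', 'ibm.com',
--             'intel.com', 'cisco.com', 'adobe.com', 'nvidia.com', 'paypal.com',
--             'stripe.com', 'square.com', 'slack.com', 'zoom.us', 'dropbox.com',
--             'box.com', 'github.com', 'gitlab.com', 'stackoverflow.com'
--         }
--
--         if clean_value in us_companies: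
--             return "controlled"
--         else:
--             return "controlled"  # Assume US if not known foreign company
--
--     # Handle .org domains (usually US-based organizations)
--     if clean_value.endswith('.org'):
--         return "controlled"
--
--     # Handle .net domains (usually US-based)
--     if clean_value.endswith('.net'):
--         return "controlled"
--
--     # Default to controlled (US) for unknown domains
--     return "controlled"
-- ===== SOURCE B (Python) =====
-- # Simpler re-implementation: extract the final dot-separated label once and
-- # look it up in a set of foreign country codes; every other path is "controlled".
-- FOREIGN_TLDS = {
--     'cn', 'ru', 'de', 'fr', 'br', 'uk', 'es', 'it', 'jp', 'kr',
--     'in', 'au', 'ca', 'mx', 'ar', 'cl', 'pe', 'co', 've', 'ec',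
--     'bo', 'py', 'uy', 'gy', 'sr', 'gf', 'fk', 'gs', 'io', 'sh',
--     'ac', 'tc', 'vg', 'ai', 'ag', 'bb', 'gd', 'lc', 'vc', 'dm',
--     'kn', 'tt', 'jm', 'ht', 'do', 'pr', 'cu', 'bs', 'bz', 'gt',
--     'sv', 'hn', 'ni', 'cr', 'pa', 'aw', 'cw', 'bq', 'sx', 'bl',
--     'mf', 'gp', 'mq', 'yt', 're', 'sc', 'mu', 'km', 'mg', 'zw',
--     'na', 'bw', 'ls', 'sz', 'za', 'mz', 'zm', 'mw', 'tz', 'ke',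
--     'ug', 'rw', 'bi', 'dj', 'so', 'et', 'er', 'sd', 'ss', 'cf',
--     'cg', 'cd', 'ga', 'gq', 'cm', 'st', 'ao', 'gw', 'gn', 'sl',
--     'lr', 'ci', 'bf', 'ml', 'ne', 'td', 'mr', 'sn', 'gm', 'cv',
--     'ma', 'dz', 'tn', 'ly', 'eg',
-- }
--
-- def classify_url(value: str) -> str:
--     clean_value = value.strip().lower()
--     if '@' in clean_value:
--         return "skip"
--     tld = clean_value.rsplit('.', 1)[-1] if '.' in clean_value else None
--     return "non-controlled" if tld in FOREIGN_TLDS else "controlled"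
-- ===== Notes on version B (the rewrite author's own statement) =====
-- stated objective: simpler
-- what changed: Replaced A's repeated endswith scans over three suffix sets and a four-branch .com/.org/.net cascade (whose branches all return "controlled") by extracting the final dot-separated label once with rsplit and doing a single membership test in a deduplicated foreign-TLD set.
import Mathlib
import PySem

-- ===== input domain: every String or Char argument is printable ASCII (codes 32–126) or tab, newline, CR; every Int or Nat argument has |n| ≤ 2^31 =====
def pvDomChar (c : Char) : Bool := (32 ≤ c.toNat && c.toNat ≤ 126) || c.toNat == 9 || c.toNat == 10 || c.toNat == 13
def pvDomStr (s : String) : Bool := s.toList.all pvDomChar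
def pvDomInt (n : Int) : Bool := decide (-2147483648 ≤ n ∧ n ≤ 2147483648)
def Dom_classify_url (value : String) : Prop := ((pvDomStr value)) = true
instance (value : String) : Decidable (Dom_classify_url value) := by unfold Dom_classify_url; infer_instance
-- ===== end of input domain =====

-- ===== PORT A =====
-- B replaces A's repeated endswith scans by extracting the final dot-label once and one set lookup (objective: simpler).
def pvUsSet : PySem.Set String := PySem.Set.ofList [".gov", ".mil", ".edu", ".us", ".org", ".net"]

def pvForeignSet : PySem.Set String := PySem.Set.ofList [
  ".cn", ".ru", ".de", ".fr", ".br", ".uk", ".es", ".it", ".jp", ".kr",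
  ".in", ".au", ".ca", ".mx", ".ar", ".cl", ".pe", ".co", ".ve", ".ec",
  ".bo", ".py", ".uy", ".gy", ".sr", ".gf", ".fk", ".gs", ".io", ".sh",
  ".ac", ".tc", ".vg", ".ai", ".ag", ".bb", ".gd", ".lc", ".vc", ".dm",
  ".kn", ".tt", ".jm", ".ht", ".do", ".pr", ".cu", ".bs", ".bz", ".gt",
  ".sv", ".hn", ".ni", ".cr", ".pa", ".aw", ".cw", ".bq", ".sx", ".bl",
  ".mf", ".gp", ".mq", ".yt", ".re", ".sc", ".mu", ".km", ".mg", ".zw",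
  ".na", ".bw", ".ls", ".sz", ".za", ".mz", ".zm", ".mw", ".tz", ".ke",
  ".ug", ".rw", ".bi", ".dj", ".so", ".et", ".er", ".sd", ".ss", ".cf",
  ".cg", ".cd", ".ga", ".gq", ".cm", ".st", ".ao", ".gw", ".gn", ".sl",
  ".lr", ".ci", ".bf", ".ml", ".ne", ".td", ".mr", ".sn", ".gm", ".gn",
  ".gw", ".cv", ".ma", ".dz", ".tn", ".ly", ".eg", ".sd", ".ss", ".et",
  ".dj", ".so", ".ke", ".tz", ".ug", ".rw", ".bi", ".mw", ".zm", ".zw",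
  ".na", ".bw", ".ls", ".sz", ".za", ".mz", ".mg", ".km", ".mu", ".sc",
  ".re", ".yt", ".mq", ".gp", ".bl", ".mf", ".sx", ".bq", ".cw", ".aw",
  ".pa", ".cr", ".ni", ".hn", ".sv", ".gt", ".bz", ".bs", ".cu", ".pr",
  ".do", ".ht", ".jm", ".tt", ".kn", ".dm", ".vc", ".lc", ".gd", ".bb",
  ".ag", ".ai", ".vg", ".tc", ".ac", ".sh", ".io", ".gs", ".fk", ".gf",
  ".sr", ".gy", ".uy", ".py", ".bo", ".ec", ".ve", ".co", ".pe", ".cl",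
  ".ar", ".mx", ".ca", ".au", ".in", ".kr", ".jp", ".it", ".es", ".uk",
  ".br", ".fr", ".de", ".ru", ".cn"]

def pvUsCompanies : PySem.Set String := PySem.Set.ofList [
  "gmail.com", "yahoo.com", "hotmail.com", "outlook.com", "aol.com", "apple.com",
  "microsoft.com", "google.com", "amazon.com", "facebook.com", "twitter.com", "linkedin.com",
  "netflix.com", "spotify.com", "uber.com", "lyft.com", "airbnb.com", "salesforce.com",
  "oracle.com", "ibm.com", "intel.com", "cisco.com", "adobe.com", "nvidia.com",
  "paypal.com", "stripe.com", "square.com", "slack.com", "zoom.us", "dropbox.com",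
  "box.com", "github.com", "gitlab.com", "stackoverflow.com"]

def classify_url (value : String) : String :=
  let clean_value := PySem.Str.lower (PySem.Str.strip value)
  if PySem.Str.isIn "@" clean_value then "skip"
  else
    match pvUsSet.find? (fun d => PySem.Str.endswith clean_value d) with
    | some _ => "controlled"
    | none =>
      match pvForeignSet.find? (fun d => PySem.Str.endswith clean_value d) with
      | some _ => "non-controlled"
      | none =>
        if PySem.Str.endswith clean_value ".com" then
          if pvUsCompanies.contains clean_value then "controlled" else "controlled"
        else if PySem.Str.endswith clean_value ".org" then "controlled"
        else if PySem.Str.endswith clean_value ".net" then "controlled"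
        else "controlled"

-- ===== PORT B =====
def pvForeignTlds : PySem.Set String := PySem.Set.ofList [
  "cn", "ru", "de", "fr", "br", "uk", "es", "it", "jp", "kr", "in", "au", "ca",
  "mx", "ar", "cl", "pe", "co", "ve", "ec", "bo", "py", "uy", "gy", "sr", "gf",
  "fk", "gs", "io", "sh", "ac", "tc", "vg", "ai", "ag", "bb", "gd", "lc", "vc",
  "dm", "kn", "tt", "jm", "ht", "do", "pr", "cu", "bs", "bz", "gt", "sv", "hn",
  "ni", "cr", "pa", "aw", "cw", "bq", "sx", "bl", "mf", "gp", "mq", "yt", "re",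
  "sc", "mu", "km", "mg", "zw", "na", "bw", "ls", "sz", "za", "mz", "zm", "mw",
  "tz", "ke", "ug", "rw", "bi", "dj", "so", "et", "er", "sd", "ss", "cf", "cg",
  "cd", "ga", "gq", "cm", "st", "ao", "gw", "gn", "sl", "lr", "ci", "bf", "ml",
  "ne", "td", "mr", "sn", "gm", "cv", "ma", "dz", "tn", "ly", "eg"]

def classify_url_alt (value : String) : String :=
  let clean_value := PySem.Str.lower (PySem.Str.strip value)
  if PySem.Str.isIn "@" clean_value then "skip"
  else
    -- hand port of clean_value.rsplit('.', 1)[-1]: the characters after the last '.' (exact)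
    let tld : Option String :=
      if PySem.Str.isIn "." clean_value then
        some (String.ofList ((clean_value.toList.reverse.takeWhile (fun c => c ≠ '.')).reverse))
      else none
    match tld with
    | some t => if pvForeignTlds.contains t then "non-controlled" else "controlled"
    | none => "controlled"

-- ===== PRECONDITION & SPEC =====
def Spec_classify_url (value : String) (out : String) : Prop := out = classify_url_alt value
instance (value : String) (out : String) : Decidable (Spec_classify_url value out) := by unfold Spec_classify_url; infer_instance

-- ===== CLAIM (what is proved, stated in full; the proofs are below) =====
def Claim_equal_classify_url : Prop := ∀ (value : String), Dom_classify_url value → Spec_classify_url value (classify_url value)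

-- ===== LEMMAS AND PROOFS =====
-- the US suffixes paired with their final labels (proof-side helper)
def pvUsCodes : List String := ["gov", "mil", "edu", "us", "org", "net"]

lemma pv_drop_head (p : Char → Bool) (l : List Char) (x : Char) (xs : List Char)
    (h : l.dropWhile p = x :: xs) : p x = false := by
  have hne : l.dropWhile p ≠ [] := by simp [h]
  have hnot := List.head_dropWhile_not p hne
  simp only [h, List.head_cons] at hnot
  exact hnot

-- suffix "."++c of s  ↔  s contains a '.' and its final dot-separated label is c
lemma pv_tld_suffix_iff (s c : List Char) (hd : '.' ∉ c) :
    ('.' :: c) <:+ s ↔ ('.' ∈ s ∧ (s.reverse.takeWhile (fun x => x ≠ '.')).reverse = c) := by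
  constructor
  · rintro ⟨t, rfl⟩
    refine ⟨by simp, ?_⟩
    have hall : ∀ x ∈ c.reverse, (fun x => decide (x ≠ '.')) x = true := by
      intro x hx; simp at hx ⊢; rintro rfl; exact hd hx
    simp only [List.reverse_append, List.reverse_cons, List.append_assoc, List.singleton_append]
    rw [List.takeWhile_append_of_pos hall]
    simp [List.takeWhile]
  · rintro ⟨hmem, htld⟩
    have hsplit := List.takeWhile_append_dropWhile (p := fun x => decide (x ≠ '.')) (l := s.reverse)
    rcases hdw : s.reverse.dropWhile (fun x => decide (x ≠ '.')) with _ | ⟨x, u⟩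
    · exfalso
      rw [hdw, List.append_nil] at hsplit
      have hmem' : '.' ∈ s.reverse.takeWhile (fun x => decide (x ≠ '.')) := by
        rw [hsplit]; simpa using hmem
      have := List.mem_takeWhile_imp hmem'
      simp at this
    · have hx : (fun x => decide (x ≠ '.')) x = false := pv_drop_head _ _ _ _ hdw
      simp only [decide_eq_false_iff_not, not_not] at hx
      subst hx
      refine ⟨u.reverse, ?_⟩
      have heq : s.reverse = s.reverse.takeWhile (fun x => decide (x ≠ '.')) ++ '.' :: u := by
        rw [← hdw]; exact hsplit.symm
      have hs := congrArg List.reverse heq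
      simp only [List.reverse_reverse, List.reverse_append, List.reverse_cons] at hs
      rw [hs, htld]
      simp

-- endswith, read through pv_tld_suffix_iff, for a suffix string d = "." ++ c
lemma pv_ends (clean d c : String) (hdc : d.toList = '.' :: c.toList) (hdot : '.' ∉ c.toList) :
    PySem.Str.endswith clean d = true ↔
      ('.' ∈ clean.toList ∧ (clean.toList.reverse.takeWhile (fun x => x ≠ '.')).reverse = c.toList) := by
  rw [PySem.Str.endswith_eq, hdc, PySem.Chars.endswith_iff]
  exact pv_tld_suffix_iff _ _ hdot

lemma pv_isIn_dot (l : List Char) :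
    PySem.Chars.isIn ['.'] l = true ↔ '.' ∈ l := by
  rw [PySem.Chars.isIn_iff_infix]
  exact List.singleton_infix_iff _ _

set_option maxRecDepth 10000 in
lemma pv_codes_ok : ∀ c ∈ pvForeignTlds, c.toList ≠ [] ∧ '.' ∉ c.toList := by decide

set_option maxRecDepth 10000 in
lemma pv_fset_to_codes : ∀ d ∈ pvForeignSet, ∃ c ∈ pvForeignTlds, d.toList = '.' :: c.toList := by decide

set_option maxRecDepth 10000 in
lemma pv_codes_to_fset : ∀ c ∈ pvForeignTlds, ∃ d ∈ pvForeignSet, d.toList = '.' :: c.toList := by decide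

set_option maxRecDepth 10000 in
lemma pv_us_ok : ∀ d ∈ pvUsSet, ∃ c ∈ pvUsCodes, d.toList = '.' :: c.toList ∧ c.toList ≠ [] ∧ '.' ∉ c.toList ∧ c ∉ pvForeignTlds := by decide

-- ===== VERDICT (by name: the statement is the Claim_ definition above) =====
set_option maxRecDepth 10000 in
theorem classify_url_spec : Claim_equal_classify_url := by
  intro value _
  unfold Spec_classify_url classify_url classify_url_alt
  set clean := PySem.Str.lower (PySem.Str.strip value)
  by_cases hat : PySem.Str.isIn "@" clean = true
  · rw [if_pos hat, if_pos hat]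
  · simp only [hat, Bool.false_eq_true, if_false]
    set T := (clean.toList.reverse.takeWhile (fun x => x ≠ '.')).reverse with hT
    rcases hus : pvUsSet.find? (fun d => PySem.Str.endswith clean d) with _ | d
    · rcases hfo : pvForeignSet.find? (fun d => PySem.Str.endswith clean d) with _ | d
      · -- both loops fail: A is "controlled" on every remaining branch
        by_cases hdot : '.' ∈ clean.toList
        · have hdotC : PySem.Chars.isIn ['.'] clean.toList = true := (pv_isIn_dot _).mpr hdot
          by_cases hcont : String.ofList T ∈ pvForeignTlds
          · exfalso
            obtain ⟨d, hdmem, hdc⟩ := pv_codes_to_fset _ hcont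
            obtain ⟨-, hnd⟩ := pv_codes_ok _ hcont
            have hp : PySem.Str.endswith clean d = true := by
              rw [pv_ends clean d (String.ofList T) hdc hnd]
              exact ⟨hdot, by rw [String.toList_ofList]⟩
            exact (List.find?_eq_none.mp hfo d hdmem) hp
          · simp [hdotC, hcont, ite_self]
        · have hdotC : PySem.Chars.isIn ['.'] clean.toList = false := by
            rw [← Bool.not_eq_true]; exact fun h => hdot ((pv_isIn_dot _).mp h)
          simp [hdotC, ite_self]
      · -- foreign loop hits: both sides "non-controlled"
        have hp := List.find?_some hfo
        have hdmem := List.mem_of_find?_eq_some hfo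
        obtain ⟨c, hcmem, hdc⟩ := pv_fset_to_codes _ hdmem
        obtain ⟨-, hnd⟩ := pv_codes_ok _ hcmem
        obtain ⟨hdot, htld⟩ := (pv_ends clean d c hdc hnd).mp hp
        have hdotC : PySem.Chars.isIn ['.'] clean.toList = true := (pv_isIn_dot _).mpr hdot
        have hofl : String.ofList T = c := by rw [← hT] at htld; rw [htld, String.ofList_toList]
        simp [hdotC, hofl, hcmem]
    · -- US loop hits: A "controlled"; B's label is a US code, never a foreign one
      have hp := List.find?_some hus
      have hdmem := List.mem_of_find?_eq_some hus
      obtain ⟨c, hcmem, hdc, -, hnd, hnc⟩ := pv_us_ok _ hdmem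
      obtain ⟨hdot, htld⟩ := (pv_ends clean d c hdc hnd).mp hp
      have hdotC : PySem.Chars.isIn ['.'] clean.toList = true := (pv_isIn_dot _).mpr hdot
      have hofl : String.ofList T = c := by rw [← hT] at htld; rw [htld, String.ofList_toList]
      simp [hdotC, hofl, hnc]
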